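-- pv_equiv track=rewrite | github.com/Xiao-Li-1011/some-assignment | COMP9021-Ass1/superpower.py | consecutive_hero_once
-- ===== SOURCE A (Python) =====
-- def consecutive_hero_once(input_number, nb_of_swiches):
--     '''
--     i to confirm the position and j for read the numbers in
--     range(nb_of_swiches), then find the least sum of all sum
--     switch them and get the result
--     >>> consecutive_hero_once([-7,1,2,3,4], 5)
--     -3
--     >>> consecutive_hero_once([4,-3,1,2,-7], 3)
--     5
--     >>> consecutive_hero_once([1,2,3,4,5], 2)
--     9
--     '''
--     output_number = [i for i in input_number]
--     sum_number = []
--     nb_of_swiches_sum = []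
--     for i in range(0, len(output_number) - nb_of_swiches + 1):
--         for j in range(0, nb_of_swiches):
--             nb_of_swiches_sum.append(output_number[i + j])
--         sum_number.append(sum(nb_of_swiches_sum))
--         nb_of_swiches_sum = []
--     return (sum(output_number) - min(sum_number) * 2)
-- ===== SOURCE B (Python) =====
-- def consecutive_hero_once(input_number, nb_of_swiches):
--     # Prefix sums: each window sum is one subtraction, one pass overall.
--     # When nb_of_swiches > len(input_number) there is no window and min() of the
--     # empty sequence raises ValueError, just as in the original.
--     if nb_of_swiches <= 0:
--         return sum(input_number)  # every window of size <= 0 sums to 0, so the minimum is 0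
--     prefix = [0]
--     for x in input_number:
--         prefix.append(prefix[-1] + x)
--     m = min(prefix[i + nb_of_swiches] - prefix[i]
--             for i in range(len(input_number) - nb_of_swiches + 1))
--     return prefix[-1] - 2 * m
-- ===== Notes on version B (the rewrite author's own statement) =====
-- stated objective: faster
-- what changed: Replaced the rebuild-and-sum of every length-k window (O(n*k)) by a prefix-sum array built in one pass, so each window sum is a single subtraction (O(n)).
import Mathlib
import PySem

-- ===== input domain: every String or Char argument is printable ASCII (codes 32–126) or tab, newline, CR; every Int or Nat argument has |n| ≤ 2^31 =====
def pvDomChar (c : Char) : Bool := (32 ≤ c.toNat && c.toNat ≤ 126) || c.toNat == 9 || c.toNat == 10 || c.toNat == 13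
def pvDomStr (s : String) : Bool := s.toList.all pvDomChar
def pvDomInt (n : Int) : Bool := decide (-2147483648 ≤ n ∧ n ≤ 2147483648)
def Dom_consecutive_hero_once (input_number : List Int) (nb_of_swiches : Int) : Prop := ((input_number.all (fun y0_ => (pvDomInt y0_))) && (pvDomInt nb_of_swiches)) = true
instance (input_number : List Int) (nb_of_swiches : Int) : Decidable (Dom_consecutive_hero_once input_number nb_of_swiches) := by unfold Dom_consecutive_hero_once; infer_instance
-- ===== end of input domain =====

-- B replaces A's rebuild-and-sum of each length-k window by a prefix-sum array, so each
-- window sum is one subtraction; equality of the RETURN value is proved on Pre_.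

-- ===== PORT A =====
-- literal transliteration: copy the list, build every window element by element,
-- sum each window, then total - min*2 (min of [] is Python's ValueError: excluded by Pre_)
def consecutive_hero_once (input_number : List Int) (nb_of_swiches : Int) : Int :=
  let output_number := input_number.map (fun i => i)
  let sum_number :=
    (PySem.List.pyRange 0 ((output_number.length : Int) - nb_of_swiches + 1) 1).map (fun i =>
      ((PySem.List.pyRange 0 nb_of_swiches 1).foldl
        (fun acc j => acc ++ [PySem.List.pyGetD output_number (i + j) 0]) []).sum)
  output_number.sum - ((PySem.List.min? sum_number (fun y => y)).getD 0) * 2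

-- ===== PORT B =====
-- literal transliteration of Source B: prefix.append(prefix[-1] + x), then
-- min over the generator of window sums (min of empty = ValueError, excluded by Pre_)
def pvPrefix (xs : List Int) : List Int :=
  xs.foldl (fun p x => p ++ [PySem.List.pyGetD p (-1) 0 + x]) [0]

def consecutive_hero_once_alt (input_number : List Int) (nb_of_swiches : Int) : Int :=
  if nb_of_swiches ≤ 0 then input_number.sum
  else
    let prefix_ := pvPrefix input_number
    let m := (PySem.List.min?
      ((PySem.List.pyRange 0 ((input_number.length : Int) - nb_of_swiches + 1) 1).map
        (fun i => PySem.List.pyGetD prefix_ (i + nb_of_swiches) 0 - PySem.List.pyGetD prefix_ i 0))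
      (fun y => y)).getD 0
    PySem.List.pyGetD prefix_ (-1) 0 - 2 * m

-- ===== PRECONDITION & SPEC =====
-- Pre_ excludes exactly the inputs with nb_of_swiches > len(input_number): there are no
-- windows, so A raises ValueError (min of an empty list) — and so does B.
def Pre_consecutive_hero_once (input_number : List Int) (nb_of_swiches : Int) : Prop :=
  nb_of_swiches ≤ (input_number.length : Int)
instance (input_number : List Int) (nb_of_swiches : Int) : Decidable (Pre_consecutive_hero_once input_number nb_of_swiches) := by unfold Pre_consecutive_hero_once; infer_instance
def pvWitness_consecutive_hero_once : List Int × Int := ([4, -3, 1, 2, -7], 3)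

def Spec_consecutive_hero_once (input_number : List Int) (nb_of_swiches : Int) (out : Int) : Prop := out = consecutive_hero_once_alt input_number nb_of_swiches
instance (input_number : List Int) (nb_of_swiches : Int) (out : Int) : Decidable (Spec_consecutive_hero_once input_number nb_of_swiches out) := by unfold Spec_consecutive_hero_once; infer_instance

-- ===== CLAIM (what is proved, stated in full; the proofs are below) =====
def Claim_equal_consecutive_hero_once : Prop := ∀ (input_number : List Int) (nb_of_swiches : Int), Dom_consecutive_hero_once input_number nb_of_swiches → Pre_consecutive_hero_once input_number nb_of_swiches → Spec_consecutive_hero_once input_number nb_of_swiches (consecutive_hero_once input_number nb_of_swiches)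

-- ===== LEMMAS AND PROOFS =====

-- window sum starting at i of length m, as a plain getD-sum
def pvS (xs : List Int) (i m : Nat) : Int :=
  ((List.range m).map (fun t => xs.getD (i + t) 0)).sum

theorem pvS_succ_right (xs : List Int) (i m : Nat) :
    pvS xs i (m + 1) = pvS xs i m + xs.getD (i + m) 0 := by
  simp [pvS, List.range_succ]

theorem take_succ_sum (xs : List Int) (n : Nat) :
    (xs.take (n + 1)).sum = (xs.take n).sum + xs.getD n 0 := by
  rw [List.take_add_one]
  cases h : xs[n]? with
  | none => simp [List.getD, h]
  | some v => simp [List.getD, h]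

-- a window sum is a difference of two prefix sums (out-of-range getD and take both clamp to 0)
theorem pvS_take_diff (xs : List Int) (i m : Nat) :
    pvS xs i m = (xs.take (i + m)).sum - (xs.take i).sum := by
  induction m with
  | zero => simp [pvS]
  | succ m ih =>
    rw [pvS_succ_right, ih, show i + (m + 1) = (i + m) + 1 from rfl, take_succ_sum]
    ring

theorem foldl_min_zeros (l : List Int) : (l.map (fun _ => (0:Int))).foldl min 0 = 0 := by
  induction l with
  | nil => rfl
  | cons x t ih => simpa using ih

-- Source B's prefix loop builds exactly the list of prefix sums
theorem pvPrefix_eq (xs : List Int) :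
    pvPrefix xs = (List.range (xs.length + 1)).map (fun i => (xs.take i).sum) := by
  induction xs using List.reverseRecOn with
  | nil => simp [pvPrefix]
  | append_singleton xs y ih =>
    unfold pvPrefix at ih ⊢
    rw [List.foldl_append, ih, List.foldl_cons, List.foldl_nil]
    have hG : PySem.List.pyGetD
        ((List.range (xs.length + 1)).map (fun i => (xs.take i).sum)) (-1) 0 = xs.sum := by
      rw [List.range_succ, List.map_append]
      simp [PySem.List.pyGetD_neg_one_append_singleton]
    have hR : (List.range (xs.length + 1 + 1)).map (fun i => ((xs ++ [y]).take i).sum)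
        = (List.range (xs.length + 1)).map (fun i => ((xs ++ [y]).take i).sum)
          ++ [((xs ++ [y]).take (xs.length + 1)).sum] := by
      rw [List.range_succ]; simp
    rw [hG, List.length_append, List.length_singleton, hR]
    congr 1
    · apply List.map_congr_left
      intro i hi
      rw [List.mem_range] at hi
      rw [List.take_append_of_le_length (by omega)]
    · have ht : (xs ++ [y]).take (xs.length + 1) = xs ++ [y] := by
        apply List.take_of_length_le; simp
      simp [ht]

theorem consecutive_hero_once_eq (xs : List Int) (k : Int)
    (hk : k ≤ (xs.length : Int)) :
    consecutive_hero_once xs k = consecutive_hero_once_alt xs k := by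
  by_cases hk0 : k ≤ 0
  · -- k ≤ 0: every window is empty in A, B returns total directly
    unfold consecutive_hero_once consecutive_hero_once_alt
    simp only [List.map_id_fun', id_eq, if_pos hk0]
    rw [PySem.List.pyRange_one_eq_nil hk0]
    simp only [List.foldl_nil, List.sum_nil]
    have hpos : (0:Int) < (xs.length : Int) - k + 1 := by omega
    rw [PySem.List.pyRange_one_cons hpos]
    simp only [List.map_cons]
    rw [PySem.List.min?_id_cons, foldl_min_zeros]
    simp
  · -- 0 < k ≤ len
    obtain ⟨kn, rfl⟩ : ∃ kn : Nat, k = (kn : Int) := ⟨k.toNat, by omega⟩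
    have hkl : kn ≤ xs.length := by exact_mod_cast hk
    unfold consecutive_hero_once consecutive_hero_once_alt
    simp only [List.map_id_fun', id_eq, if_neg hk0]
    have hlen : (xs.length : Int) - (kn : Int) + 1 = ((xs.length - kn + 1 : Nat) : Int) := by
      omega
    -- A's list of window sums is the list of pvS-window sums
    have hinner : ∀ i0 : Nat,
        ((PySem.List.pyRange 0 (kn : Int) 1).foldl
          (fun acc j => acc ++ [PySem.List.pyGetD xs ((i0 : Int) + j) 0]) []).sum
        = pvS xs i0 kn := by
      intro i0
      rw [show ((PySem.List.pyRange 0 (kn : Int) 1).foldl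
          (fun acc j => acc ++ [PySem.List.pyGetD xs ((i0 : Int) + j) 0]) [])
          = (PySem.List.pyRange 0 (kn : Int) 1).map
            (fun j => PySem.List.pyGetD xs ((i0 : Int) + j) 0) by
        simpa using PySem.List.foldl_append_singleton_eq_map
          (fun j => PySem.List.pyGetD xs ((i0 : Int) + j) 0) (PySem.List.pyRange 0 (kn : Int) 1) []]
      rw [PySem.List.pyRange_zero_natCast, List.map_map]
      unfold pvS
      congr 1
      apply List.map_congr_left
      intro t _
      simp only [Function.comp_def]
      rw [show ((i0 : Int) + (t : Int)) = ((i0 + t : Nat) : Int) by push_cast; ring,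
        PySem.List.pyGetD_natCast]
    have hsums : (PySem.List.pyRange 0 ((xs.length : Int) - (kn : Int) + 1) 1).map (fun i =>
        ((PySem.List.pyRange 0 (kn : Int) 1).foldl
          (fun acc j => acc ++ [PySem.List.pyGetD xs (i + j) 0]) []).sum)
        = (List.range (xs.length - kn + 1)).map (fun i0 => pvS xs i0 kn) := by
      rw [hlen, PySem.List.pyRange_zero_natCast (xs.length - kn + 1), List.map_map]
      apply List.map_congr_left
      intro i0 _
      simp only [Function.comp_def]
      exact hinner i0
    rw [hsums]
    -- B's list of prefix-sum differences is the same list of pvS-window sums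
    have hpref : ∀ j : Nat, j ≤ xs.length →
        PySem.List.pyGetD (pvPrefix xs) (j : Int) 0 = (xs.take j).sum := by
      intro j hj
      rw [PySem.List.pyGetD_natCast, pvPrefix_eq]
      have : j < xs.length + 1 := by omega
      simp [List.getD, this]
    have hbsums : (PySem.List.pyRange 0 ((xs.length : Int) - (kn : Int) + 1) 1).map
        (fun i => PySem.List.pyGetD (pvPrefix xs) (i + (kn : Int)) 0
          - PySem.List.pyGetD (pvPrefix xs) i 0)
        = (List.range (xs.length - kn + 1)).map (fun i0 => pvS xs i0 kn) := by
      rw [hlen, PySem.List.pyRange_zero_natCast (xs.length - kn + 1), List.map_map]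
      apply List.map_congr_left
      intro i0 hi0
      rw [List.mem_range] at hi0
      simp only [Function.comp_def]
      rw [show ((i0 : Int) + (kn : Int)) = ((i0 + kn : Nat) : Int) by push_cast; ring,
        hpref (i0 + kn) (by omega), hpref i0 (by omega), pvS_take_diff]
    rw [hbsums]
    -- prefix[-1] is the total
    have hlast : PySem.List.pyGetD (pvPrefix xs) (-1) 0 = xs.sum := by
      rw [pvPrefix_eq, List.range_succ, List.map_append]
      simp [PySem.List.pyGetD_neg_one_append_singleton]
    rw [hlast]
    ring

-- ===== VERDICT (by name: the statement is the Claim_ definition above) =====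
theorem consecutive_hero_once_spec : Claim_equal_consecutive_hero_once := by
  intro xs k _ hpre
  unfold Spec_consecutive_hero_once
  exact consecutive_hero_once_eq xs k hpre
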